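-- pv_equiv track=rewrite | github.com/pypi-data/pypi-mirror-314 | packages/MMLToolbox/MMLToolbox-1.5.19-py3-none-any.whl/MMLToolbox/pxi/JuliaPostProc.py | findAscendingDescendingIndices
-- ===== SOURCE A (Python) =====
-- def findAscendingDescendingIndices(H, M):
--     ind_ascending = []
--     ind_descending = []
--     for n in range(len(H)):
--         if not any(H[n] > H[i] and M[n] < M[i] for i in range(len(H))):
--             ind_ascending.append(n)
--         elif not any(H[n] < H[i] and M[n] > M[i] for i in range(len(H))):
--             ind_descending.append(n)
--     return ind_ascending, ind_descending
-- ===== SOURCE B (Python) =====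
-- def findAscendingDescendingIndices(H, M):
--     pairs = list(zip(H, M))
--     bounds = {}
--     for h in H:
--         if h not in bounds:
--             mb = max((m for x, m in pairs if x < h), default=None)
--             ma = min((m for x, m in pairs if x > h), default=None)
--             bounds[h] = (mb, ma)
--     asc, desc = [], []
--     for i, (h, m) in enumerate(pairs):
--         mb, ma = bounds[h]
--         if mb is None or m >= mb:
--             asc.append(i)
--         elif ma is None or m <= ma:
--             desc.append(i)
--     return asc, desc
-- ===== Notes on version B (the rewrite author's own statement) =====
-- stated objective: alternative
-- what changed: Replaces A's per-index pair of quadratic `any` scans with (max-below, min-above) thresholds computed once per distinct H value and cached in a dict, then a single threshold comparison per index.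
-- outside the precondition, e.g. on findAscendingDescendingIndices([0, 0], []): A returns ([0, 1], []), B returns ([], [])
import Mathlib
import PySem

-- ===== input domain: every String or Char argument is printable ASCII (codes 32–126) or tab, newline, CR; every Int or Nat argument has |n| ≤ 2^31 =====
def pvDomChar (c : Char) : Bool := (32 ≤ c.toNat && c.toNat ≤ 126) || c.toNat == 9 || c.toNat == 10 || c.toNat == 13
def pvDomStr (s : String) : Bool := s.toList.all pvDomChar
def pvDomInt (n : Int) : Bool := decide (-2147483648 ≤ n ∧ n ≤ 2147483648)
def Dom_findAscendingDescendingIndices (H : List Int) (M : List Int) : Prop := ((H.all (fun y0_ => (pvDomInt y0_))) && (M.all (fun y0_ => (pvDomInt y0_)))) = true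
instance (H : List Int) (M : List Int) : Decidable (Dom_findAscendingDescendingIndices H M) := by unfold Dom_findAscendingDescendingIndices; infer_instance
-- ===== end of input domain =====

-- B replaces A's per-index double `any` scans by per-distinct-H-value (max-below, min-above)
-- thresholds cached once in a dict, then one threshold comparison per index; same return
-- value on the stated precondition.

-- ===== PORT A =====
-- xs[i] inside A; Pre_ keeps every index used by A in range, so the .getD 0 default never fires
def pvAt (xs : List Int) (i : Int) : Int := PySem.List.pyGetD xs i 0

def findAscendingDescendingIndices (H : List Int) (M : List Int) : List Int × List Int :=
  let idx := PySem.List.pyRange 0 (H.length : Int) 1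
  idx.foldl (fun acc n =>
    if !(idx.any fun i => decide (pvAt H n > pvAt H i ∧ pvAt M n < pvAt M i)) then
      (acc.1 ++ [n], acc.2)
    else if !(idx.any fun i => decide (pvAt H n < pvAt H i ∧ pvAt M n > pvAt M i)) then
      (acc.1, acc.2 ++ [n])
    else acc) ([], [])

-- ===== PORT B =====
-- the (max-below, min-above) thresholds B caches for one H value h
def pvBounds (pairs : List (Int × Int)) (h : Int) : Option Int × Option Int :=
  (PySem.List.max? ((pairs.filter (fun p => decide (p.1 < h))).map Prod.snd) (fun y => y),
   PySem.List.min? ((pairs.filter (fun p => decide (h < p.1))).map Prod.snd) (fun y => y))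

def findAscendingDescendingIndices_alt (H : List Int) (M : List Int) : List Int × List Int :=
  let pairs := H.zip M
  let bounds : PySem.Dict Int (Option Int × Option Int) :=
    H.foldl (fun d h => if d.contains h then d else d.insert h (pvBounds pairs h))
      PySem.Dict.empty
  (PySem.List.enumerate pairs 0).foldl (fun acc ip =>
    let b := bounds.getD ip.2.1 (none, none)
    if (match b.1 with | none => true | some v => decide (ip.2.2 ≥ v)) then
      (acc.1 ++ [ip.1], acc.2)
    else if (match b.2 with | none => true | some v => decide (ip.2.2 ≤ v)) then
      (acc.1, acc.2 ++ [ip.1])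
    else acc) ([], [])

-- ===== PRECONDITION & SPEC =====
-- Pre_ excludes inputs with len(M) < len(H): A indexes M at every position of H and raises
-- IndexError on some such inputs; where short-circuiting happens to avoid the raise, A's value
-- is an accident of evaluation order (B's zip naturally truncates to the common length there).
def Pre_findAscendingDescendingIndices (H : List Int) (M : List Int) : Prop :=
  H.length ≤ M.length
instance (H : List Int) (M : List Int) : Decidable (Pre_findAscendingDescendingIndices H M) := by
  unfold Pre_findAscendingDescendingIndices; infer_instance

def pvWitness_findAscendingDescendingIndices : List Int × List Int := ([1, 2, 2], [3, 1, 5])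

def Spec_findAscendingDescendingIndices (H : List Int) (M : List Int) (out : List Int × List Int) : Prop := out = findAscendingDescendingIndices_alt H M
instance (H : List Int) (M : List Int) (out : List Int × List Int) : Decidable (Spec_findAscendingDescendingIndices H M out) := by unfold Spec_findAscendingDescendingIndices; infer_instance

-- ===== CLAIM (what is proved, stated in full; the proofs are below) =====
def Claim_equal_findAscendingDescendingIndices : Prop := ∀ (H : List Int) (M : List Int), Dom_findAscendingDescendingIndices H M → Pre_findAscendingDescendingIndices H M → Spec_findAscendingDescendingIndices H M (findAscendingDescendingIndices H M)

-- ===== LEMMAS AND PROOFS =====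

-- A's two-bucket classifying loop over indices
theorem pv_foldA (l : List Int) (p q : Int → Bool) (a b : List Int) :
    l.foldl (fun acc n =>
        if p n then (acc.1 ++ [n], acc.2)
        else if q n then (acc.1, acc.2 ++ [n])
        else acc) (a, b)
      = (a ++ l.filter p, b ++ l.filter (fun n => !p n && q n)) := by
  induction l generalizing a b with
  | nil => simp
  | cons x t ih =>
      simp only [List.foldl_cons, List.filter_cons]
      by_cases hp : p x = true
      · simp [hp, ih]
      · by_cases hq : q x = true
        · simp [hp, hq, ih]
        · simp [hp, hq, ih]

-- B's two-bucket classifying loop over enumerated pairs, collecting the indices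
theorem pv_foldB {α : Type} (l : List (Int × α)) (p q : Int × α → Bool) (a b : List Int) :
    l.foldl (fun acc x =>
        if p x then (acc.1 ++ [x.1], acc.2)
        else if q x then (acc.1, acc.2 ++ [x.1])
        else acc) (a, b)
      = (a ++ (l.filter p).map Prod.fst,
         b ++ (l.filter (fun x => !p x && q x)).map Prod.fst) := by
  induction l generalizing a b with
  | nil => simp
  | cons x t ih =>
      simp only [List.foldl_cons, List.filter_cons]
      by_cases hp : p x = true
      · simp [hp, ih]
      · by_cases hq : q x = true
        · simp [hp, hq, ih]
        · simp [hp, hq, ih]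

-- memoising fold: lookup returns the pure function of the key, for every key seen
theorem pv_memo_get {β : Type} (F : Int → β) (l : List Int) (d : PySem.Dict Int β)
    (hd : ∀ k, d.contains k = true → d.get? k = some (F k)) :
    ∀ k, k ∈ l ∨ d.contains k = true →
      (l.foldl (fun d h => if d.contains h then d else d.insert h (F h)) d).get? k
        = some (F k) := by
  induction l generalizing d with
  | nil =>
      intro k hk
      rcases hk with h | h
      · cases h
      · simpa using hd k h
  | cons x t ih =>
      intro k hk
      simp only [List.foldl_cons]
      by_cases hc : d.contains x = true
      · simp only [hc, if_true]
        apply ih d hd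
        rcases hk with h | h
        · rcases List.mem_cons.mp h with rfl | h
          · right; exact hc
          · left; exact h
        · right; exact h
      · simp only [hc, if_false, Bool.false_eq_true]
        apply ih
        · intro k' hk'
          by_cases hkx : k' = x
          · subst hkx; simp [PySem.Dict.get?_insert_self]
          · rw [PySem.Dict.get?_insert_of_ne (hne := hkx)]
            apply hd
            rw [PySem.Dict.contains_insert] at hk'
            simpa [hkx] using hk'
        · rcases hk with h | h
          · rcases List.mem_cons.mp h with rfl | h
            · right; exact PySem.Dict.contains_insert_self _ _ _
            · left; exact h
          · right
            rw [PySem.Dict.contains_insert]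
            simp [h]

theorem pv_bounds_getD (H M : List Int) (h : Int) (hh : h ∈ H) :
    (H.foldl (fun d x => if d.contains x then d else d.insert x (pvBounds (H.zip M) x))
        PySem.Dict.empty).getD h (none, none) = pvBounds (H.zip M) h := by
  rw [PySem.Dict.getD_eq_get?_getD,
      pv_memo_get (pvBounds (H.zip M)) H PySem.Dict.empty
        (fun k hk => by rw [PySem.Dict.contains_empty] at hk; cases hk) h (Or.inl hh)]
  rfl

-- B's max-below threshold test equals "no pair strictly left-below dominates"
theorem pv_asc_point (pairs : List (Int × Int)) (h m : Int) :
    (match (pvBounds pairs h).1 with | none => true | some v => decide (m ≥ v))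
      = !(pairs.any fun p => decide (p.1 < h ∧ m < p.2)) := by
  rcases hmax : (pvBounds pairs h).1 with _ | v
  · have hnil : pairs.filter (fun p => decide (p.1 < h)) = [] :=
      List.map_eq_nil_iff.1 ((PySem.List.max?_eq_none_iff _ (fun y : Int => y)).1 hmax)
    have hany : (pairs.any fun p => decide (p.1 < h ∧ m < p.2)) = false := by
      rw [List.any_eq_false]
      intro p hp hcon
      rw [decide_eq_true_eq] at hcon
      have : p ∈ pairs.filter (fun p => decide (p.1 < h)) :=
        List.mem_filter.2 ⟨hp, by simp [hcon.1]⟩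
      rw [hnil] at this
      cases this
    simp only [hany, Bool.not_false]
  · have hmax' : PySem.List.max? ((pairs.filter (fun p => decide (p.1 < h))).map Prod.snd)
        (fun y => y) = some v := by simpa [pvBounds] using hmax
    have hmem := PySem.List.max?_mem hmax'
    have hub := PySem.List.max?_isMax hmax'
    by_cases hge : m ≥ v
    · have hany : (pairs.any fun p => decide (p.1 < h ∧ m < p.2)) = false := by
        rw [List.any_eq_false]
        intro p hp hcon
        rw [decide_eq_true_eq] at hcon
        have h2 : p.2 ∈ (pairs.filter (fun p => decide (p.1 < h))).map Prod.snd :=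
          List.mem_map.2 ⟨p, List.mem_filter.2 ⟨hp, by simp [hcon.1]⟩, rfl⟩
        have := hub p.2 h2
        simp only at this
        omega
      rw [hany]
      simp [hge]
    · obtain ⟨p, hpf, hpv⟩ := List.mem_map.1 hmem
      obtain ⟨hp, hph⟩ := List.mem_filter.1 hpf
      rw [decide_eq_true_eq] at hph
      have hany : (pairs.any fun p => decide (p.1 < h ∧ m < p.2)) = true :=
        List.any_eq_true.2 ⟨p, hp, by rw [decide_eq_true_eq]; omega⟩
      rw [hany]
      simp [hge]

-- B's min-above threshold test equals "no pair strictly right-above dominates"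
theorem pv_desc_point (pairs : List (Int × Int)) (h m : Int) :
    (match (pvBounds pairs h).2 with | none => true | some v => decide (m ≤ v))
      = !(pairs.any fun p => decide (h < p.1 ∧ p.2 < m)) := by
  rcases hmin : (pvBounds pairs h).2 with _ | v
  · have hnil : pairs.filter (fun p => decide (h < p.1)) = [] :=
      List.map_eq_nil_iff.1 ((PySem.List.min?_eq_none_iff _ (fun y : Int => y)).1 hmin)
    have hany : (pairs.any fun p => decide (h < p.1 ∧ p.2 < m)) = false := by
      rw [List.any_eq_false]
      intro p hp hcon
      rw [decide_eq_true_eq] at hcon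
      have : p ∈ pairs.filter (fun p => decide (h < p.1)) :=
        List.mem_filter.2 ⟨hp, by simp [hcon.1]⟩
      rw [hnil] at this
      cases this
    simp only [hany, Bool.not_false]
  · have hmin' : PySem.List.min? ((pairs.filter (fun p => decide (h < p.1))).map Prod.snd)
        (fun y => y) = some v := by simpa [pvBounds] using hmin
    have hmem := PySem.List.min?_mem hmin'
    have hlb := PySem.List.min?_isMin hmin'
    by_cases hle : m ≤ v
    · have hany : (pairs.any fun p => decide (h < p.1 ∧ p.2 < m)) = false := by
        rw [List.any_eq_false]
        intro p hp hcon
        rw [decide_eq_true_eq] at hcon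
        have h2 : p.2 ∈ (pairs.filter (fun p => decide (h < p.1))).map Prod.snd :=
          List.mem_map.2 ⟨p, List.mem_filter.2 ⟨hp, by simp [hcon.1]⟩, rfl⟩
        have := hlb p.2 h2
        simp only at this
        omega
      rw [hany]
      simp [hle]
    · obtain ⟨p, hpf, hpv⟩ := List.mem_map.1 hmem
      obtain ⟨hp, hph⟩ := List.mem_filter.1 hpf
      rw [decide_eq_true_eq] at hph
      have hany : (pairs.any fun p => decide (h < p.1 ∧ p.2 < m)) = true :=
        List.any_eq_true.2 ⟨p, hp, by rw [decide_eq_true_eq]; omega⟩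
      rw [hany]
      simp [hle]

-- an `any` over all indices equals an `any` over the zipped pairs
theorem pv_any_bridge (H M : List Int) (hPre : H.length ≤ M.length) (P : Int → Int → Bool) :
    ((PySem.List.pyRange 0 (H.length : Int) 1).any fun i => P (pvAt H i) (pvAt M i))
      = (H.zip M).any (fun p => P p.1 p.2) := by
  rw [Bool.eq_iff_iff]
  simp only [List.any_eq_true]
  constructor
  · rintro ⟨i, hi, hP⟩
    rw [PySem.List.mem_pyRange_one] at hi
    obtain ⟨h0, h1⟩ := hi
    have h1' : i < (H.length : Int) := h1
    have hkH : i.toNat < H.length := by omega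
    have hkM : i.toNat < M.length := by omega
    have hkz : i.toNat < (H.zip M).length := by rw [List.length_zip]; omega
    refine ⟨(H.zip M)[i.toNat], List.getElem_mem _, ?_⟩
    rw [List.getElem_zip]
    unfold pvAt at hP
    rwa [PySem.List.pyGetD_eq_getElem H 0 h0 h1',
         PySem.List.pyGetD_eq_getElem M 0 h0 (by omega)] at hP
  · rintro ⟨p, hp, hP⟩
    obtain ⟨k, hk, hpk⟩ := List.mem_iff_getElem.1 hp
    have hkH : k < H.length := by rw [List.length_zip] at hk; omega
    have hkM : k < M.length := by rw [List.length_zip] at hk; omega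
    refine ⟨(k : Int), PySem.List.mem_pyRange_one.2 ⟨Int.natCast_nonneg k, by omega⟩, ?_⟩
    unfold pvAt
    rw [PySem.List.pyGetD_eq_getElem H 0 (Int.natCast_nonneg k) (by omega),
        PySem.List.pyGetD_eq_getElem M 0 (Int.natCast_nonneg k) (by omega)]
    rw [List.getElem_zip] at hpk
    rw [← hpk] at hP
    simpa using hP

theorem pv_main (H M : List Int) (hPre : H.length ≤ M.length) :
    findAscendingDescendingIndices H M = findAscendingDescendingIndices_alt H M := by
  unfold findAscendingDescendingIndices findAscendingDescendingIndices_alt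
  simp only [pv_foldA, pv_foldB, List.nil_append]
  have hlen : (H.zip M).length = H.length := by rw [List.length_zip]; omega
  rw [PySem.List.enumerate_eq_map_pyRange (H.zip M) ((0 : Int), (0 : Int))]
  simp only [List.filter_map, List.map_map, Function.comp_def, List.map_id', PySem.List.len_eq, hlen]
  have hpair : ∀ n : Int, n ∈ PySem.List.pyRange 0 (H.length : Int) 1 →
      PySem.List.pyGetD (H.zip M) n ((0 : Int), (0 : Int)) = (pvAt H n, pvAt M n) := by
    intro n hn
    rw [PySem.List.mem_pyRange_one] at hn
    obtain ⟨h0, h1⟩ := hn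
    unfold pvAt
    rw [PySem.List.pyGetD_eq_getElem (H.zip M) ((0 : Int), (0 : Int)) h0 (by omega),
        List.getElem_zip,
        PySem.List.pyGetD_eq_getElem H 0 h0 h1,
        PySem.List.pyGetD_eq_getElem M 0 h0 (by omega)]
  have hdict : ∀ n : Int, n ∈ PySem.List.pyRange 0 (H.length : Int) 1 →
      (List.foldl (fun d h => if d.contains h = true then d else d.insert h (pvBounds (H.zip M) h))
          PySem.Dict.empty H).getD (pvAt H n) (none, none) = pvBounds (H.zip M) (pvAt H n) := by
    intro n hn
    rw [PySem.List.mem_pyRange_one] at hn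
    obtain ⟨h0, h1⟩ := hn
    apply pv_bounds_getD
    unfold pvAt
    rw [PySem.List.pyGetD_eq_getElem H 0 h0 h1]
    exact List.getElem_mem _
  simp only [Prod.mk.injEq]
  constructor
  · apply List.filter_congr
    intro n hn
    rw [hpair n hn]
    dsimp only
    rw [hdict n hn, pv_asc_point (H.zip M) (pvAt H n) (pvAt M n)]
    simp only [gt_iff_lt]
    rw [pv_any_bridge H M hPre (fun a b => decide (a < pvAt H n ∧ pvAt M n < b))]
  · apply List.filter_congr
    intro n hn
    rw [hpair n hn]
    dsimp only
    rw [hdict n hn, pv_asc_point (H.zip M) (pvAt H n) (pvAt M n),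
        pv_desc_point (H.zip M) (pvAt H n) (pvAt M n)]
    simp only [gt_iff_lt]
    rw [pv_any_bridge H M hPre (fun a b => decide (a < pvAt H n ∧ pvAt M n < b)),
        pv_any_bridge H M hPre (fun a b => decide (pvAt H n < a ∧ b < pvAt M n))]

-- ===== VERDICT (by name: the statement is the Claim_ definition above) =====
theorem findAscendingDescendingIndices_spec : Claim_equal_findAscendingDescendingIndices := by
  intro H M _ hPre
  unfold Spec_findAscendingDescendingIndices
  exact pv_main H M hPre
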